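-- pv_equiv track=rewrite | github.com/lbliii/chirp-ui | scripts/build_chirpui_css.py | _wrap_in_layer
-- ===== SOURCE A (Python) =====
-- def _wrap_in_layer(body: str, layer: str) -> str:
--     """Wrap ``body`` in ``@layer NAME { … }``.
--
--     If the body already starts with ``@layer`` (ignoring leading whitespace and
--     comments), return it unchanged — the partial owns its own layering (S5's
--     envelope form, or any other explicit author).
--     """
--     # Skip leading whitespace and CSS comments to check the first real token.
--     i = 0
--     while i < len(body):
--         if body[i].isspace():
--             i += 1
--             continue
--         if body.startswith("/*", i):
--             end = body.find("*/", i + 2)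
--             i = len(body) if end == -1 else end + 2
--             continue
--         break
--     if body[i:].lstrip().startswith("@layer "):
--         return body
--     # Ensure a trailing newline before the closing brace so it sits on its own line.
--     if body and not body.endswith("\n"):
--         body += "\n"
--     return f"@layer {layer} {{\n{body}}}\n"
-- ===== SOURCE B (Python) =====
-- def _wrap_in_layer(body: str, layer: str) -> str:
--     """Wrap ``body`` in ``@layer NAME { ... }`` unless it already starts with
--     ``@layer`` (after leading whitespace and CSS comments)."""
--     rest = body.lstrip()
--     while rest.startswith("/*"):
--         end = rest.find("*/", 2)
--         if end == -1:
--             rest = ""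
--             break
--         rest = rest[end + 2:].lstrip()
--     if rest.startswith("@layer "):
--         return body
--     if body and not body.endswith("\n"):
--         body += "\n"
--     return f"@layer {layer} {{\n{body}}}\n"
-- ===== Notes on version B (the rewrite author's own statement) =====
-- stated objective: simpler
-- what changed: The prefix scan over leading whitespace/CSS comments is done by slicing (lstrip, then repeatedly cut '/*...*/' off the front) instead of walking a character index through the string.
import Mathlib
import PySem

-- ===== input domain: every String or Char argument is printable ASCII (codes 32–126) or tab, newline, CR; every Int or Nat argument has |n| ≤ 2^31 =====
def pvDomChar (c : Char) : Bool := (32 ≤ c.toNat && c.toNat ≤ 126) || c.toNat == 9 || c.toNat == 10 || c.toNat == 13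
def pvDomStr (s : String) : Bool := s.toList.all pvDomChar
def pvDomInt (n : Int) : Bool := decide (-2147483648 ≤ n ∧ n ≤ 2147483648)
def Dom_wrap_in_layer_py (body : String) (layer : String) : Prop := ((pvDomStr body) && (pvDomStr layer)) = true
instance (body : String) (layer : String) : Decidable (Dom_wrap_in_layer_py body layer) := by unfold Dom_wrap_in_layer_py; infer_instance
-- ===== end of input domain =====

-- B replaces A's index-walking prefix scan by slicing: lstrip the body, then repeatedly cut
-- '/*…*/' comments off the front; the wrapping code is unchanged (objective: simpler).


-- ===== PORT A =====
-- A's 'while i < len(body)' scan; body.startswith("/*", i) is startswith on the drop-i suffix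
-- (exact for 0 ≤ i ≤ len(body)), body.find("*/", i + 2) is PySem.Chars.findFrom.
def wrapScanA (cs : List Char) (i : Nat) : Nat :=
  if h : i < cs.length then
    if PySem.Chars.isspace cs[i] then wrapScanA cs (i + 1)
    else if h2 : PySem.Chars.startswith (cs.drop i) ['/', '*'] then
      if he : PySem.Chars.findFrom cs ['*', '/'] ((i : Int) + 2) = -1 then cs.length
      else wrapScanA cs ((PySem.Chars.findFrom cs ['*', '/'] ((i : Int) + 2)).toNat + 2)
    else i
  else i
termination_by cs.length - i
decreasing_by
  · omega
  · have hlen : 2 ≤ (cs.drop i).length :=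
      le_trans (by norm_num) ((PySem.Chars.startswith_iff _ _).1 h2).length_le
    have hk : i + 2 ≤ cs.length := by simp [List.length_drop] at hlen; omega
    have hcast : (((i + 2 : Nat)) : Int) = (i : Int) + 2 := by push_cast; ring
    have hs := PySem.Chars.findFrom_natCast_spec cs ['*', '/'] (i + 2) hk (by rw [hcast]; exact he)
    rw [hcast] at hs
    omega

def wrap_in_layer_py (body : String) (layer : String) : String :=
  if PySem.Chars.startswith
      (PySem.Chars.lstrip (body.toList.drop (wrapScanA body.toList 0)))
      ['@','l','a','y','e','r',' '] then body
  else
    String.ofList (['@','l','a','y','e','r',' '] ++ layer.toList ++ [' ','{','\n'] ++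
      (if !body.toList.isEmpty && !PySem.Chars.endswith body.toList ['\n']
        then body.toList ++ ['\n'] else body.toList) ++ ['}','\n'])

-- ===== PORT B =====
-- B's 'while rest.startswith("/*")' loop over the lstripped suffix.
def wrapLoopB (rest : List Char) : List Char :=
  if h2 : PySem.Chars.startswith rest ['/', '*'] then
    if he : PySem.Chars.findFrom rest ['*', '/'] 2 = -1 then []
    else wrapLoopB (PySem.Chars.lstrip
          (rest.drop ((PySem.Chars.findFrom rest ['*', '/'] 2).toNat + 2)))
  else rest
termination_by rest.length
decreasing_by
  have hlen : 2 ≤ rest.length :=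
    le_trans (by norm_num) ((PySem.Chars.startswith_iff _ _).1 h2).length_le
  calc (PySem.Chars.lstrip (rest.drop ((PySem.Chars.findFrom rest ['*', '/'] 2).toNat + 2))).length
      ≤ (rest.drop ((PySem.Chars.findFrom rest ['*', '/'] 2).toNat + 2)).length := by
        simp only [PySem.Chars.lstrip]; exact List.length_dropWhile_le _ _
    _ < rest.length := by simp [List.length_drop]; omega

def wrap_in_layer_py_alt (body : String) (layer : String) : String :=
  if PySem.Chars.startswith (wrapLoopB (PySem.Chars.lstrip body.toList))
      ['@','l','a','y','e','r',' '] then body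
  else
    String.ofList (['@','l','a','y','e','r',' '] ++ layer.toList ++ [' ','{','\n'] ++
      (if !body.toList.isEmpty && !PySem.Chars.endswith body.toList ['\n']
        then body.toList ++ ['\n'] else body.toList) ++ ['}','\n'])

-- ===== PRECONDITION & SPEC =====
def Spec_wrap_in_layer_py (body : String) (layer : String) (out : String) : Prop := out = wrap_in_layer_py_alt body layer
instance (body : String) (layer : String) (out : String) : Decidable (Spec_wrap_in_layer_py body layer out) := by unfold Spec_wrap_in_layer_py; infer_instance

-- ===== CLAIM (what is proved, stated in full; the proofs are below) =====
def Claim_equal_wrap_in_layer_py : Prop := ∀ (body : String) (layer : String), Dom_wrap_in_layer_py body layer → Spec_wrap_in_layer_py body layer (wrap_in_layer_py body layer)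

-- ===== LEMMAS AND PROOFS =====
theorem lstrip_cons_space {c : Char} {cs : List Char} (h : PySem.Chars.isspace c = true) :
    PySem.Chars.lstrip (c :: cs) = PySem.Chars.lstrip cs := by
  simp [PySem.Chars.lstrip, List.dropWhile, h]

theorem lstrip_cons_nospace {c : Char} {cs : List Char} (h : PySem.Chars.isspace c = false) :
    PySem.Chars.lstrip (c :: cs) = c :: cs := by
  simp [PySem.Chars.lstrip, List.dropWhile, h]

theorem lstrip_idem (cs : List Char) :
    PySem.Chars.lstrip (PySem.Chars.lstrip cs) = PySem.Chars.lstrip cs := by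
  induction cs with
  | nil => rfl
  | cons c t ih =>
    by_cases h : PySem.Chars.isspace c = true
    · rw [lstrip_cons_space h, ih]
    · rw [lstrip_cons_nospace (by simpa using h), lstrip_cons_nospace (by simpa using h)]

theorem loopB_fixed (rest : List Char) (h : PySem.Chars.lstrip rest = rest) :
    PySem.Chars.lstrip (wrapLoopB rest) = wrapLoopB rest := by
  fun_induction wrapLoopB rest with
  | case1 rest h2 he => rfl
  | case2 rest h2 he ih => exact ih (lstrip_idem _)
  | case3 rest h2 => exact h

-- the slice-of-comment head: from 'rest starts with /*' get the two leading chars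
theorem lstrip_of_startswith_comment {s : List Char}
    (h2 : PySem.Chars.startswith s ['/', '*'] = true) :
    PySem.Chars.lstrip s = s := by
  obtain ⟨t, ht⟩ := (PySem.Chars.startswith_iff _ _).1 h2
  subst ht
  exact lstrip_cons_nospace (by decide)

theorem scan_eq (cs : List Char) (i : Nat) :
    cs.drop (wrapScanA cs i) = wrapLoopB (PySem.Chars.lstrip (cs.drop i)) := by
  fun_induction wrapScanA cs i with
  | case1 i h hsp ih =>
    rw [List.drop_eq_getElem_cons h, lstrip_cons_space hsp]
    exact ih
  | case2 i h hsp h2 he =>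
    -- unterminated comment: A jumps to len; B returns []
    rw [lstrip_of_startswith_comment h2, wrapLoopB, dif_pos h2, List.drop_length]
    have hlen : 2 ≤ (cs.drop i).length :=
      le_trans (by norm_num) ((PySem.Chars.startswith_iff _ _).1 h2).length_le
    have hk : i + 2 ≤ cs.length := by simp [List.length_drop] at hlen; omega
    have hcast : (((i + 2 : Nat)) : Int) = (i : Int) + 2 := by push_cast; ring
    have hA := PySem.Chars.findFrom_natCast cs ['*', '/'] (i + 2) hk
    rw [hcast] at hA
    have hcast2 : ((2 : Nat) : Int) = (2 : Int) := by norm_num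
    have hB := PySem.Chars.findFrom_natCast (cs.drop i) ['*', '/'] 2 (by omega)
    rw [hcast2, List.drop_drop] at hB
    rw [hA] at he
    split_ifs at he with hf
    · rw [dif_pos (by rw [hB, if_pos hf])]
    · exfalso
      have := PySem.Chars.neg_one_le_find (cs.drop (i + 2)) ['*', '/']
      omega
  | case3 i h hsp h2 he ih =>
    rw [lstrip_of_startswith_comment h2, wrapLoopB, dif_pos h2]
    have hlen : 2 ≤ (cs.drop i).length :=
      le_trans (by norm_num) ((PySem.Chars.startswith_iff _ _).1 h2).length_le
    have hk : i + 2 ≤ cs.length := by simp [List.length_drop] at hlen; omega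
    have hcast : (((i + 2 : Nat)) : Int) = (i : Int) + 2 := by push_cast; ring
    have hA := PySem.Chars.findFrom_natCast cs ['*', '/'] (i + 2) hk
    rw [hcast] at hA
    have hcast2 : ((2 : Nat) : Int) = (2 : Int) := by norm_num
    have hB := PySem.Chars.findFrom_natCast (cs.drop i) ['*', '/'] 2 (by omega)
    rw [hcast2, List.drop_drop] at hB
    rw [hA] at he
    split_ifs at he with hf
    · exact absurd rfl he
    · have hfpos : 0 ≤ PySem.Chars.find (cs.drop (i + 2)) ['*', '/'] := by
        have := PySem.Chars.neg_one_le_find (cs.drop (i + 2)) ['*', '/']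
        omega
      rw [dif_neg (by rw [hB, if_neg hf]; omega)]
      have harg : (cs.drop i).drop
            ((PySem.Chars.findFrom (cs.drop i) ['*', '/'] 2).toNat + 2)
          = cs.drop ((PySem.Chars.findFrom cs ['*', '/'] ((i : Int) + 2)).toNat + 2) := by
        rw [hB, if_neg hf, List.drop_drop, hA, if_neg hf]
        congr 1
        omega
      rw [harg]
      exact ih
  | case4 i h hsp h2 =>
    have hl : PySem.Chars.lstrip (cs.drop i) = cs.drop i := by
      rw [List.drop_eq_getElem_cons h]
      exact lstrip_cons_nospace (by simpa using hsp)
    rw [hl, wrapLoopB, dif_neg h2]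
  | case5 i h =>
    rw [List.drop_eq_nil_of_le (by omega)]
    show ([] : List Char) = wrapLoopB []
    rw [wrapLoopB, dif_neg (by decide)]

-- ===== VERDICT (by name: the statement is the Claim_ definition above) =====
theorem wrap_in_layer_py_spec : Claim_equal_wrap_in_layer_py := by
  intro body layer _
  unfold Spec_wrap_in_layer_py wrap_in_layer_py wrap_in_layer_py_alt
  have h0 : body.toList.drop (wrapScanA body.toList 0)
      = wrapLoopB (PySem.Chars.lstrip body.toList) := by
    simpa using scan_eq body.toList 0
  rw [h0, loopB_fixed _ (lstrip_idem _)]
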